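-- pv_equiv track=rewrite | github.com/raf-me/ITMO | FPIn/Algoritms2/PythonScripts/lab2.4.py | mytree
-- ===== SOURCE A (Python) =====
-- def mytree(lab, x):
--     left, right = 0, len(lab)
--
--     while left < right:
--         mid = (left + right) // 2
--
--         if lab[mid] < x:
--             left = mid + 1
--
--         else:
--             right = mid
--
--     return left
-- ===== SOURCE B (Python) =====
-- def mytree(lab, x):
--     def f(seg):
--         if not seg:
--             return 0
--         m = len(seg) // 2
--         if seg[m] < x:
--             return m + 1 + f(seg[m + 1:])
--         return f(seg[:m])
--     return f(lab)
-- ===== Notes on version B (the rewrite author's own statement) =====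
-- stated objective: alternative
-- what changed: B replaces A's iterative index-pair loop over the whole list with a divide-and-conquer recursion on list slices: the helper returns a position relative to its segment and offsets are added back up, rather than maintaining absolute left/right bounds.
import Mathlib
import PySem

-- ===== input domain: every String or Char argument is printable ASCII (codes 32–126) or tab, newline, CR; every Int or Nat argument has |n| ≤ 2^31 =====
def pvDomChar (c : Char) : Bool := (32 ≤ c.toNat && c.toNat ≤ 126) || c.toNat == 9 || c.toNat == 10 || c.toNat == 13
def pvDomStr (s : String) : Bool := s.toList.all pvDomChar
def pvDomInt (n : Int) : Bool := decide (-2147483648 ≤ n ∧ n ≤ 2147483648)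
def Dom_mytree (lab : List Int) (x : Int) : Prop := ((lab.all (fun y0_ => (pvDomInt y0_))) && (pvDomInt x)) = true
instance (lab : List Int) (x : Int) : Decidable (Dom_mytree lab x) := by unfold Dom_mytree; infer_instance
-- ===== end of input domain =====

-- B replaces A's index-pair while-loop by a divide-and-conquer recursion on list
-- slices, returning segment-relative offsets (objective: alternative; not faster).

-- ===== PORT A =====
-- A's while-loop, as a tail-recursive function of its mutable state (left, right);
-- lab[mid] via pyGet?: mid is always in range when the loop runs from (0, len lab),
-- so the .getD 0 default is never used.
def mytreeLoop (lab : List Int) (x : Int) (left right : Int) : Int :=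
  if h : left < right then
    let mid := PySem.Int.floordiv (left + right) 2
    if (PySem.List.pyGet? lab mid).getD 0 < x then
      mytreeLoop lab x (mid + 1) right
    else
      mytreeLoop lab x left mid
  else
    left
termination_by (right - left).toNat
decreasing_by
  · have : PySem.Int.floordiv (left + right) 2 = (left + right) / 2 :=
      PySem.Int.floordiv_eq_ediv_of_pos (by omega)
    omega
  · have : PySem.Int.floordiv (left + right) 2 = (left + right) / 2 :=
      PySem.Int.floordiv_eq_ediv_of_pos (by omega)
    omega

def mytree (lab : List Int) (x : Int) : Int :=
  mytreeLoop lab x 0 (lab.length : Int)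

-- ===== PORT B =====
-- Source B's helper f: recursion on the segment itself; seg[m] via pyGet? (m is in
-- range on a nonempty segment), slices seg[m+1:] / seg[:m] via PySem.List.slice.
def mytreeSeg (x : Int) (seg : List Int) : Int :=
  if seg = [] then 0
  else
    let m := PySem.Int.floordiv (seg.length : Int) 2
    if (PySem.List.pyGet? seg m).getD 0 < x then
      m + 1 + mytreeSeg x (PySem.List.slice seg (some (m + 1)) none)
    else
      mytreeSeg x (PySem.List.slice seg none (some m))
termination_by seg.length
decreasing_by
  · have hm : PySem.Int.floordiv (seg.length : Int) 2 = ((seg.length / 2 : Nat) : Int) :=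
      PySem.Int.floordiv_natCast _ _
    have h1 : PySem.Int.floordiv (seg.length : Int) 2 + 1 = ((seg.length / 2 + 1 : Nat) : Int) := by
      rw [hm]; push_cast; ring
    rw [h1, PySem.List.slice_from_natCast]
    have : seg.length ≠ 0 := by simpa [List.length_eq_zero_iff] using ‹¬ seg = []›
    simp [List.length_drop]; omega
  · have hm : PySem.Int.floordiv (seg.length : Int) 2 = ((seg.length / 2 : Nat) : Int) :=
      PySem.Int.floordiv_natCast _ _
    rw [hm, PySem.List.slice_to_natCast]
    have : seg.length ≠ 0 := by simpa [List.length_eq_zero_iff] using ‹¬ seg = []›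
    simp; omega

def mytree_alt (lab : List Int) (x : Int) : Int :=
  mytreeSeg x lab

-- ===== PRECONDITION & SPEC =====
def Spec_mytree (lab : List Int) (x : Int) (out : Int) : Prop := out = mytree_alt lab x
instance (lab : List Int) (x : Int) (out : Int) : Decidable (Spec_mytree lab x out) := by unfold Spec_mytree; infer_instance

-- ===== CLAIM (what is proved, stated in full; the proofs are below) =====
def Claim_equal_mytree : Prop := ∀ (lab : List Int) (x : Int), Dom_mytree lab x → Spec_mytree lab x (mytree lab x)

-- ===== LEMMAS AND PROOFS =====

-- The loop on absolute bounds (left, right) computes left + (B's answer on the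
-- segment lab[left:right]).
theorem loop_eq_seg (lab : List Int) (x : Int) :
    ∀ (k : Nat) (left right : Int), (right - left).toNat = k →
      0 ≤ left → left ≤ right → right ≤ (lab.length : Int) →
      mytreeLoop lab x left right
        = left + mytreeSeg x ((lab.drop left.toNat).take (right - left).toNat) := by
  intro k
  induction k using Nat.strong_induction_on with
  | _ k ih =>
    intro left right hk h0 hlr hrn
    by_cases h : left < right
    · -- segment facts
      set l := left.toNat with hl
      set n := (right - left).toNat with hn
      have hlen : ((lab.drop l).take n).length = n := by
        simp [List.length_take, List.length_drop]; omega
      have hne : (lab.drop l).take n ≠ [] := by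
        intro he; rw [he] at hlen; simp at hlen; omega
      -- midpoints
      have hmid : PySem.Int.floordiv (left + right) 2 = left + ((n / 2 : Nat) : Int) := by
        rw [PySem.Int.floordiv_eq_ediv_of_pos (by omega : (0:Int) < 2)]
        omega
      have hmseg : PySem.Int.floordiv ((((lab.drop l).take n).length : Nat) : Int) 2
          = ((n / 2 : Nat) : Int) := by
        rw [hlen]; exact PySem.Int.floordiv_natCast _ _
      have hm2 : n / 2 < n := by omega
      -- the probed elements agree
      have hidx : l + n / 2 < lab.length := by
        have := List.length_drop (l := lab) (i := l)
        omega
      have hgetA : PySem.List.pyGet? lab (PySem.Int.floordiv (left + right) 2)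
          = some (lab[l + n / 2]'hidx) := by
        rw [hmid, show left + ((n / 2 : Nat) : Int) = ((l + n / 2 : Nat) : Int) by omega,
          PySem.List.pyGet?_natCast]
        simp [hidx]
      have hgetB : PySem.List.pyGet? ((lab.drop l).take n)
            (PySem.Int.floordiv ((((lab.drop l).take n).length : Nat) : Int) 2)
          = some (lab[l + n / 2]'hidx) := by
        rw [hmseg, PySem.List.pyGet?_natCast]
        simp [List.getElem?_drop, hm2, hidx]
      -- unfold both sides one step
      rw [mytreeLoop, dif_pos h, mytreeSeg, if_neg hne]
      simp only [hgetA, hgetB, Option.getD_some]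
      by_cases hcmp : lab[l + n / 2]'hidx < x
      · rw [if_pos hcmp, if_pos hcmp]
        have hrec := ih ((right - (PySem.Int.floordiv (left + right) 2 + 1)).toNat)
          (by rw [hmid]; omega)
          (PySem.Int.floordiv (left + right) 2 + 1) right rfl
          (by rw [hmid]; omega) (by rw [hmid]; omega) hrn
        rw [hrec, hmid]
        -- match the segments
        have hslice : PySem.List.slice ((lab.drop l).take n)
            (some (PySem.Int.floordiv ((((lab.drop l).take n).length : Nat) : Int) 2 + 1)) none
            = (lab.drop (l + (n / 2 + 1))).take (n - (n / 2 + 1)) := by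
          rw [hmseg, show ((n / 2 : Nat) : Int) + 1 = ((n / 2 + 1 : Nat) : Int) by push_cast; ring,
            PySem.List.slice_from_natCast, List.drop_take, List.drop_drop]
        rw [hslice]
        have hseg2 : ((left + ((n / 2 : Nat) : Int) + 1).toNat) = l + (n / 2 + 1) := by omega
        have hlen2 : (right - (left + ((n / 2 : Nat) : Int) + 1)).toNat = n - (n / 2 + 1) := by omega
        rw [hseg2, hlen2, hmseg]
        ring
      · rw [if_neg hcmp, if_neg hcmp]
        have hrec := ih ((PySem.Int.floordiv (left + right) 2 - left).toNat)
          (by rw [hmid]; omega)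
          left (PySem.Int.floordiv (left + right) 2) rfl
          h0 (by rw [hmid]; omega) (by rw [hmid]; omega)
        rw [hrec, hmid]
        have hslice : PySem.List.slice ((lab.drop l).take n) none
            (some (PySem.Int.floordiv ((((lab.drop l).take n).length : Nat) : Int) 2))
            = (lab.drop l).take (n / 2) := by
          rw [hmseg, PySem.List.slice_to_natCast, List.take_take]
          congr 1
          omega
        rw [hslice]
        have h3 : (left + ((n / 2 : Nat) : Int) - left).toNat = n / 2 := by omega
        rw [h3, show left.toNat = l from rfl]
    · -- loop exits; segment is empty
      have hrl : right = left := by omega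
      rw [mytreeLoop, dif_neg h, mytreeSeg, if_pos ?_]
      · ring
      · have : (right - left).toNat = 0 := by omega
        simp [this]

-- ===== VERDICT (by name: the statement is the Claim_ definition above) =====
theorem mytree_spec : Claim_equal_mytree := by
  intro lab x _
  unfold Spec_mytree mytree mytree_alt
  rw [loop_eq_seg lab x ((lab.length : Int) - 0).toNat 0 (lab.length : Int) rfl
    (by omega) (by omega) (by omega)]
  simp
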